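-- pv_equiv track=rewrite | github.com/sureshaccipnlabs/finintel_run | ingestion/risk_engine.py | _consecutive_condition
-- ===== SOURCE A (Python) =====
-- def _consecutive_condition(values: list[bool]) -> int:
--     """Return length of trailing consecutive True run."""
--     count = 0
--     for v in reversed(values):
--         if v:
--             count += 1
--         else:
--             break
--     return count
-- ===== SOURCE B (Python) =====
-- def _consecutive_condition(values: list[bool]) -> int:
--     """Return length of trailing consecutive True run."""
--     count = 0
--     for v in values:
--         count = count + 1 if v else 0
--     return count
-- ===== Notes on version B (the rewrite author's own statement) =====
-- stated objective: alternative
-- what changed: Replaces the reversed-order scan with early break by a single forward pass maintaining a counter that resets to 0 on every False; no reversal or break is needed.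
import Mathlib
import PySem

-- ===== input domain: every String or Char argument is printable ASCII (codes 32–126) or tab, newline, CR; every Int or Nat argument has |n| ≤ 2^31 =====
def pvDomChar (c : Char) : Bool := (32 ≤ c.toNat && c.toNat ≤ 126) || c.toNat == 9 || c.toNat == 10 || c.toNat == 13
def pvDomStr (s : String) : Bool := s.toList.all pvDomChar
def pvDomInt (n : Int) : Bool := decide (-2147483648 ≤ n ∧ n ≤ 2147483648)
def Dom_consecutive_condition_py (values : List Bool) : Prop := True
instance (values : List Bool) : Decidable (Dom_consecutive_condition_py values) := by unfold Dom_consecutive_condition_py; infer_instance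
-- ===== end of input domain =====

-- B replaces A's backward scan-with-break by a forward pass with a resetting counter (alternative decomposition, same cost).


-- ===== PORT A =====
-- 'for v in reversed(values): if v: count += 1 else: break' — recursion over values.reverse,
-- stopping (the break) at the first False.
def pvLoopA : List Bool → Int → Int
  | [], count => count
  | v :: rest, count => if v then pvLoopA rest (count + 1) else count

def consecutive_condition_py (values : List Bool) : Int :=
  pvLoopA values.reverse 0

-- ===== PORT B =====
-- forward pass: count = count + 1 if v else 0
def consecutive_condition_py_alt (values : List Bool) : Int :=
  values.foldl (fun count v => if v then count + 1 else 0) 0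

-- ===== PRECONDITION & SPEC =====
def Spec_consecutive_condition_py (values : List Bool) (out : Int) : Prop := out = consecutive_condition_py_alt values
instance (values : List Bool) (out : Int) : Decidable (Spec_consecutive_condition_py values out) := by unfold Spec_consecutive_condition_py; infer_instance

-- ===== CLAIM (what is proved, stated in full; the proofs are below) =====
def Claim_equal_consecutive_condition_py : Prop := ∀ (values : List Bool), Dom_consecutive_condition_py values → Spec_consecutive_condition_py values (consecutive_condition_py values)

-- ===== LEMMAS AND PROOFS =====

-- A's loop with accumulator c adds c to the accumulator-0 result (the break returns the running count).
theorem pvLoopA_acc (xs : List Bool) (c : Int) :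
    pvLoopA xs c = pvLoopA xs 0 + c := by
  induction xs generalizing c with
  | nil => simp [pvLoopA]
  | cons v rest ih =>
    cases v with
    | false => simp [pvLoopA]
    | true =>
      simp only [pvLoopA, if_true]
      rw [ih (c + 1), ih (0 + 1)]
      ring

theorem main_eq (ys : List Bool) :
    pvLoopA ys 0 = ys.reverse.foldl (fun count v => if v then count + 1 else 0) 0 := by
  induction ys with
  | nil => simp [pvLoopA]
  | cons v rest ih =>
    simp only [List.reverse_cons, List.foldl_append, List.foldl, pvLoopA]
    cases v with
    | false => simp
    | true => simp [pvLoopA_acc rest 1, ih]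

-- ===== VERDICT (by name: the statement is the Claim_ definition above) =====
theorem consecutive_condition_py_spec : Claim_equal_consecutive_condition_py := by
  intro values _
  unfold Spec_consecutive_condition_py consecutive_condition_py consecutive_condition_py_alt
  rw [main_eq values.reverse, List.reverse_reverse]
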